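-- pv_equiv track=rewrite | github.com/AleksandarLukic96/02180_Belief_Revision_Agent | utils.py | surrounded
-- ===== SOURCE A (Python) =====
-- def surrounded(sentence):
--     if sentence[0] != '(':
--         return False
--     open = 0
--     for i in range(len(sentence)):
--         character = sentence[i]
--         if character == '(':
--             open += 1
--         elif character == ')':
--             open -= 1
--         if open == 0 and i < len(sentence)-1:
--             return False
--     return True
-- ===== SOURCE B (Python) =====
-- def surrounded(sentence):
--     if sentence[0] != '(':
--         return False
--
--     def match(i):
--         # an unmatched '(' is pending just before index i; return the index
--         # just past its matching ')', or None if it is never closed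
--         while i < len(sentence):
--             c = sentence[i]
--             if c == ')':
--                 return i + 1
--             if c == '(':
--                 j = match(i + 1)
--                 if j is None:
--                     return None
--                 i = j
--             else:
--                 i += 1
--         return None
--
--     j = match(1)
--     return j is None or j == len(sentence)
-- ===== Notes on version B (the rewrite author's own statement) =====
-- stated objective: alternative
-- what changed: Replaces A's integer balance counter scan by a recursive-descent matcher: it locates the ')' that closes the leading '(' (recursing on the call stack for each nested '(') and accepts iff that match is missing or sits at the very end of the string.
import Mathlib
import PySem

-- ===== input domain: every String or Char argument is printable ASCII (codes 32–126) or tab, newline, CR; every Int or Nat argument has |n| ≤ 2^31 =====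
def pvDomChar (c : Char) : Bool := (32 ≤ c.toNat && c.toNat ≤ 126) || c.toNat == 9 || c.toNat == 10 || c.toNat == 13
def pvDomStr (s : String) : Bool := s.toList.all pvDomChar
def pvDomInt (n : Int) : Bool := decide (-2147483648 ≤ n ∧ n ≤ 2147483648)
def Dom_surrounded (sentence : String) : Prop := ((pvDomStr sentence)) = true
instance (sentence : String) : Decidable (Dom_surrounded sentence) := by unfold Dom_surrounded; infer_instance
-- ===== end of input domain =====

-- B replaces A's balance-counter scan by a recursive-descent matcher for the closing paren of the leading '(' (alternative algorithm, same cost).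

-- ===== PORT A =====
-- the for-loop of A: index i, total length n, running counter `open`
def surroundedLoop (chars : List Char) (i n : Nat) (opn : Int) : Bool :=
  match chars with
  | [] => true
  | c :: rest =>
    let opn' := if c = '(' then opn + 1 else if c = ')' then opn - 1 else opn
    if opn' = 0 ∧ i < n - 1 then false
    else surroundedLoop rest (i + 1) n opn'

def surrounded (sentence : String) : Bool :=
  match sentence.toList with
  | [] => false  -- sentence[0] raises IndexError in Python; excluded by Pre_surrounded
  | c :: _ =>
    if c ≠ '(' then false
    else surroundedLoop sentence.toList 0 sentence.toList.length 0

-- ===== PORT B =====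
-- B's `match(i)`: the suffix of the string from index i replaces the index; the
-- returned suffix (just past the matching ')') carries the length bound needed
-- for termination of the nested recursive call (i = j; continue the while loop).
def matchParen : (l : List Char) → Option {l' : List Char // l'.length < l.length}
  | [] => none
  | c :: rest =>
    if c = ')' then some ⟨rest, by simp⟩
    else if c = '(' then
      match matchParen rest with
      | none => none
      | some ⟨rest', h⟩ =>
        match matchParen rest' with
        | none => none
        | some ⟨r, h2⟩ => some ⟨r, by simp; omega⟩
    else
      match matchParen rest with
      | none => none
      | some ⟨r, h⟩ => some ⟨r, by simp; omega⟩
termination_by l => l.length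
decreasing_by all_goals simp_all <;> omega

def surrounded_alt (sentence : String) : Bool :=
  match sentence.toList with
  | [] => false  -- sentence[0] raises IndexError in Python; excluded by Pre_surrounded
  | c :: rest =>
    if c ≠ '(' then false
    else
      match matchParen rest with
      | none => true            -- j is None
      | some ⟨r, _⟩ => r.isEmpty  -- j == len(sentence)

-- ===== PRECONDITION & SPEC =====
-- Pre_ excludes only the empty string, on which both A and B raise IndexError at sentence[0].
def Pre_surrounded (sentence : String) : Prop := sentence ≠ ""
instance (sentence : String) : Decidable (Pre_surrounded sentence) := by unfold Pre_surrounded; infer_instance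
def pvWitness_surrounded : String := "(a)"

def Spec_surrounded (sentence : String) (out : Bool) : Prop := out = surrounded_alt sentence
instance (sentence : String) (out : Bool) : Decidable (Spec_surrounded sentence out) := by unfold Spec_surrounded; infer_instance

-- ===== CLAIM (what is proved, stated in full; the proofs are below) =====
def Claim_equal_surrounded : Prop := ∀ (sentence : String), Dom_surrounded sentence → Pre_surrounded sentence → Spec_surrounded sentence (surrounded sentence)

-- ===== LEMMAS AND PROOFS =====

-- proof-side view of matchParen without the subtype
def mF (l : List Char) : Option (List Char) := (matchParen l).map Subtype.val

theorem mF_nil : mF [] = none := by simp [mF, matchParen]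

theorem mF_close (rest : List Char) : mF (')' :: rest) = some rest := by
  simp [mF, matchParen]

theorem mF_open (rest : List Char) : mF ('(' :: rest) = (mF rest).bind mF := by
  simp only [mF, matchParen]
  cases h : matchParen rest with
  | none => simp
  | some r =>
    cases h2 : matchParen r.val with
    | none => simp [h2]
    | some r2 => simp [h2]

theorem mF_other (c : Char) (rest : List Char) (h1 : c ≠ '(') (h2 : c ≠ ')') :
    mF (c :: rest) = mF rest := by
  simp only [mF, matchParen, if_neg h2, if_neg h1]
  cases h : matchParen rest with
  | none => simp
  | some r => simp

-- iterated matcher: close `bal` pending open parens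
def iterMF : Nat → List Char → Option (List Char)
  | 0, l => some l
  | k+1, l => (mF l).bind (iterMF k)

theorem iterMF_open (k : Nat) (rest : List Char) :
    iterMF (k+1) ('(' :: rest) = iterMF (k+2) rest := by
  show (mF ('(' :: rest)).bind (iterMF k) = (mF rest).bind (iterMF (k+1))
  rw [mF_open, Option.bind_assoc]
  rfl

theorem surroundedLoop_cons (c : Char) (rest : List Char) (i n : Nat) (opn : Int) :
    surroundedLoop (c :: rest) i n opn =
      (let opn' := if c = '(' then opn + 1 else if c = ')' then opn - 1 else opn
       if opn' = 0 ∧ i < n - 1 then false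
       else surroundedLoop rest (i + 1) n opn') := rfl

-- loop invariant: with bal ≥ 1 pending opens, A's early-exit loop returns true
-- iff those opens are never all closed, or are all closed exactly at the end
theorem surroundedLoop_eq_iterMF (l : List Char) (i : Nat) (bal : Nat) (hbal : 1 ≤ bal) :
    surroundedLoop l i (i + l.length) (bal : Int)
      = ((iterMF bal l).elim true fun r => r.isEmpty) := by
  induction l generalizing i bal with
  | nil =>
    obtain ⟨k, rfl⟩ : ∃ k, bal = k + 1 := ⟨bal - 1, by omega⟩
    simp [surroundedLoop, iterMF, mF_nil]
  | cons c rest ih =>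
    rw [surroundedLoop_cons]
    have hn : i + (c :: rest).length = (i + 1) + rest.length := by simp; omega
    by_cases hc1 : c = '('
    · subst hc1
      rw [if_pos rfl]
      have hne : ¬ (((bal : Int) + 1 = 0) ∧ i < (i + ('(' :: rest).length) - 1) := by
        intro ⟨h, _⟩; omega
      rw [if_neg hne]
      have hcast : ((bal : Int) + 1) = ((bal + 1 : Nat) : Int) := by push_cast; ring
      rw [hcast, hn, ih (i+1) (bal+1) (by omega)]
      obtain ⟨k, rfl⟩ : ∃ k, bal = k + 1 := ⟨bal - 1, by omega⟩
      rw [iterMF_open]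
    · by_cases hc2 : c = ')'
      · subst hc2
        rw [if_neg hc1, if_pos rfl]
        obtain ⟨k, rfl⟩ : ∃ k, bal = k + 1 := ⟨bal - 1, by omega⟩
        have hcast : ((k + 1 : Nat) : Int) - 1 = ((k : Nat) : Int) := by push_cast; ring
        rw [hcast]
        have hiter : iterMF (k+1) (')' :: rest) = iterMF k rest := by
          show (mF (')' :: rest)).bind (iterMF k) = _
          rw [mF_close]; rfl
        rw [hiter]
        cases k with
        | zero =>
          -- balance hits 0: early exit iff rest ≠ []
          cases rest with
          | nil =>
            have hne : ¬ (((0 : Nat) : Int) = 0 ∧ i < (i + [')'].length) - 1) := by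
              intro ⟨_, h⟩; simp at h
            rw [if_neg hne]
            simp [surroundedLoop, iterMF]
          | cons d rest' =>
            rw [if_pos ⟨by simp, by simp⟩]
            simp [iterMF]
        | succ m =>
          have hne : ¬ (((m + 1 : Nat) : Int) = 0 ∧ i < (i + (')' :: rest).length) - 1) := by
            intro ⟨h, _⟩; omega
          rw [if_neg hne, hn, ih (i+1) (m+1) (by omega)]
      · rw [if_neg hc1, if_neg hc2]
        have hne : ¬ (((bal : Nat) : Int) = 0 ∧ i < (i + (c :: rest).length) - 1) := by
          intro ⟨h, _⟩; omega
        rw [if_neg hne, hn, ih i.succ bal hbal]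
        obtain ⟨k, rfl⟩ : ∃ k, bal = k + 1 := ⟨bal - 1, by omega⟩
        have hiter : iterMF (k+1) (c :: rest) = iterMF (k+1) rest := by
          show (mF (c :: rest)).bind (iterMF k) = _
          rw [mF_other c rest hc1 hc2]; rfl
        rw [hiter]

theorem surrounded_eq (sentence : String) :
    surrounded sentence = surrounded_alt sentence := by
  unfold surrounded surrounded_alt
  cases h : sentence.toList with
  | nil => rfl
  | cons c rest =>
    by_cases hc : c = '('
    · subst hc
      simp only [ne_eq, not_true_eq_false, if_false]
      -- first loop step: counter becomes 1, no early exit (1 ≠ 0)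
      show surroundedLoop ('(' :: rest) 0 ('(' :: rest).length 0 = _
      rw [show ('(' :: rest).length = 0 + ('(' :: rest).length by omega]
      rw [surroundedLoop_cons, if_pos rfl]
      have hne : ¬ ((0 : Int) + 1 = 0 ∧ 0 < (0 + ('(' :: rest).length) - 1) := by
        intro ⟨h, _⟩; omega
      rw [if_neg hne]
      rw [show (0 : Int) + 1 = ((1 : Nat) : Int) by norm_num]
      rw [show 0 + ('(' :: rest).length = 1 + rest.length by simp [Nat.add_comm]]
      rw [surroundedLoop_eq_iterMF rest 1 1 (by omega)]
      show ((mF rest).bind (iterMF 0)).elim true (fun r => r.isEmpty) = _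
      unfold mF
      cases h2 : matchParen rest with
      | none => simp
      | some r => simp [iterMF]
    · simp [hc]

-- ===== VERDICT (by name: the statement is the Claim_ definition above) =====
theorem surrounded_spec : Claim_equal_surrounded := by
  intro s _ _
  unfold Spec_surrounded
  exact surrounded_eq s
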